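-- pv_equiv track=rewrite | github.com/Matt-Aurora-Ventures/Jarvis | core/ai_runtime/memory/compression.py | compress_log_entries
-- ===== SOURCE A (Python) =====
-- from typing import List, Dict, Any
--
-- def compress_log_entries(entries: List[str], max_length: int = 500) -> str:
--     """
--     Compress a list of log entries into a summary.
--
--     This is a simple implementation - agents can use AI for better compression.
--     """
--     if not entries:
--         return ""
--
--     # Count occurrences
--     counts: Dict[str, int] = {}
--     for entry in entries:
--         # Extract first 50 chars as key
--         key = entry[:50].strip()
--         counts[key] = counts.get(key, 0) + 1
--
--     # Build summary
--     summary_parts = []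
--     for key, count in sorted(counts.items(), key=lambda x: x[1], reverse=True):
--         if count > 1:
--             summary_parts.append(f"{key}... (x{count})")
--         else:
--             summary_parts.append(key)
--
--         # Check length
--         current = "\n".join(summary_parts)
--         if len(current) > max_length:
--             summary_parts = summary_parts[:-1]
--             break
--
--     return "\n".join(summary_parts)
-- ===== SOURCE B (Python) =====
-- from typing import List, Dict
--
-- def compress_log_entries(entries: List[str], max_length: int = 500) -> str:
--     # Count occurrences by 50-char stripped prefix (same keying as the original).
--     counts: Dict[str, int] = {}
--     for entry in entries:
--         key = entry[:50].strip()
--         counts[key] = counts.get(key, 0) + 1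
--
--     # Format every part up front, then cap with a running length counter:
--     # no repeated re-join of the accumulated summary.
--     parts = [f"{k}... (x{c})" if c > 1 else k
--              for k, c in sorted(counts.items(), key=lambda x: x[1], reverse=True)]
--
--     kept: List[str] = []
--     total = 0
--     for part in parts:
--         cand = len(part) if not kept else total + 1 + len(part)
--         if cand > max_length:
--             break
--         kept.append(part)
--         total = cand
--     return "\n".join(kept)
-- ===== Notes on version B (the rewrite author's own statement) =====
-- stated objective: alternative
-- what changed: B formats all summary parts up front from the sorted counts, then caps them in a separate pass that maintains a running joined-length counter and breaks before appending, instead of A's single loop that appends, re-joins the whole accumulated summary to measure its length, and pops the overflowing part.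
import Mathlib
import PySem

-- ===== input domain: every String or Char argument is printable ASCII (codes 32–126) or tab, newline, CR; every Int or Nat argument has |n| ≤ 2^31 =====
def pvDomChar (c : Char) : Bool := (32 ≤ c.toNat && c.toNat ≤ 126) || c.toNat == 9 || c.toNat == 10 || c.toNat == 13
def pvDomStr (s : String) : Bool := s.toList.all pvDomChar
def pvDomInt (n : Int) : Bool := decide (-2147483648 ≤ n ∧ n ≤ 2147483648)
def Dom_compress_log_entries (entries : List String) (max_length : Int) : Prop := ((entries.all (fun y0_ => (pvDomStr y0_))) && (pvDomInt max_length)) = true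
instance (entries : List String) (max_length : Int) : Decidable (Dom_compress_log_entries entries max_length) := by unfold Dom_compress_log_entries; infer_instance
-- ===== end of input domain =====

-- B re-decomposes A's summary loop: it formats all parts up front, then caps with a
-- running length counter instead of re-joining the accumulated summary each iteration
-- (objective: simpler/alternative decomposition, same result).

-- ===== PORT A =====
-- A's summary loop: append the formatted part, re-join, and on overflow drop the
-- last part (summary_parts[:-1]) and break.
def pvALoop (maxLen : Int) : List (String × Int) → List String → List String
  | [], parts => parts
  | (key, count) :: rest, parts =>
    let parts' := parts ++
      [if count > 1 then PySem.Str.join "" [key, "... (x", PySem.Int.toStr count, ")"] else key]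
    if PySem.Str.len (PySem.Str.join "\n" parts') > maxLen then
      PySem.List.slice parts' none (some (-1))
    else
      pvALoop maxLen rest parts'

def compress_log_entries (entries : List String) (max_length : Int) : String :=
  if entries.isEmpty then ""
  else
    let counts := entries.foldl (fun d entry =>
      let key := PySem.Str.strip (PySem.Str.slice entry none (some 50))
      d.insert key (d.getD key 0 + 1)) (PySem.Dict.empty : PySem.Dict String Int)
    PySem.Str.join "\n"
      (pvALoop max_length (PySem.List.sorted counts.items (fun x => x.2) true) [])

-- ===== PORT B =====
-- B's capping pass: running total length, break before appending an overflowing part.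
def pvBCap (maxLen : Int) : List String → List String → Int → List String
  | [], kept, _ => kept
  | p :: rest, kept, total =>
    let cand := if kept.isEmpty then PySem.Str.len p else total + 1 + PySem.Str.len p
    if cand > maxLen then kept
    else pvBCap maxLen rest (kept ++ [p]) cand

def compress_log_entries_alt (entries : List String) (max_length : Int) : String :=
  let counts := entries.foldl (fun d entry =>
    let key := PySem.Str.strip (PySem.Str.slice entry none (some 50))
    d.insert key (d.getD key 0 + 1)) (PySem.Dict.empty : PySem.Dict String Int)
  let parts := (PySem.List.sorted counts.items (fun x => x.2) true).map
    (fun kc => if kc.2 > 1 then PySem.Str.join "" [kc.1, "... (x", PySem.Int.toStr kc.2, ")"] else kc.1)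
  PySem.Str.join "\n" (pvBCap max_length parts [] 0)

-- ===== PRECONDITION & SPEC =====
def Spec_compress_log_entries (entries : List String) (max_length : Int) (out : String) : Prop := out = compress_log_entries_alt entries max_length
instance (entries : List String) (max_length : Int) (out : String) : Decidable (Spec_compress_log_entries entries max_length out) := by unfold Spec_compress_log_entries; infer_instance

-- ===== CLAIM (what is proved, stated in full; the proofs are below) =====
def Claim_equal_compress_log_entries : Prop := ∀ (entries : List String) (max_length : Int), Dom_compress_log_entries entries max_length → Spec_compress_log_entries entries max_length (compress_log_entries entries max_length)

-- ===== LEMMAS AND PROOFS =====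

-- length of '\\n'.join(xs ++ [p]) in terms of '\\n'.join(xs), on the Chars side
theorem pv_chars_len_snoc (xs : List (List Char)) (p : List Char) :
    (PySem.Chars.join ['\n'] (xs ++ [p])).length =
      if xs = [] then p.length
      else (PySem.Chars.join ['\n'] xs).length + 1 + p.length := by
  induction xs with
  | nil => simp [PySem.Chars.join_singleton]
  | cons x xs ih =>
    cases xs with
    | nil =>
      simp [PySem.Chars.join_cons_cons, PySem.Chars.join_singleton]
      omega
    | cons y ys =>
      simp only [List.cons_append, PySem.Chars.join_cons_cons, List.length_append] at ih ⊢
      simp only [if_false, reduceCtorEq] at ih ⊢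
      omega

-- the same fact lifted to PySem.Str.len / PySem.Str.join
theorem pv_len_join_snoc (xs : List String) (p : String) :
    PySem.Str.len (PySem.Str.join "\n" (xs ++ [p])) =
      if xs.isEmpty then PySem.Str.len p
      else PySem.Str.len (PySem.Str.join "\n" xs) + 1 + PySem.Str.len p := by
  have hsep : "\n".toList = ['\n'] := rfl
  have h := pv_chars_len_snoc (xs.map String.toList) p.toList
  simp only [PySem.Str.len_eq, PySem.Str.toList_join, List.map_append, List.map_cons,
    List.map_nil, hsep]
  rw [h]
  cases xs <;> simp

-- the two loops compute the same list when B's running total is the joined length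
theorem pv_loop_eq (maxLen : Int) (items : List (String × Int)) (kept : List String) :
    pvALoop maxLen items kept =
      pvBCap maxLen
        (items.map (fun kc => if kc.2 > 1 then
            PySem.Str.join "" [kc.1, "... (x", PySem.Int.toStr kc.2, ")"] else kc.1))
        kept (PySem.Str.len (PySem.Str.join "\n" kept)) := by
  induction items generalizing kept with
  | nil => simp [pvALoop, pvBCap]
  | cons kc rest ih =>
    obtain ⟨key, count⟩ := kc
    simp only [pvALoop, pvBCap, List.map_cons]
    rw [PySem.List.slice_to_neg_one, List.dropLast_concat]
    generalize (if count > 1 then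
        PySem.Str.join "" [key, "... (x", PySem.Int.toStr count, ")"] else key) = P
    rw [pv_len_join_snoc]
    by_cases hk : kept.isEmpty = true
    · simp only [hk, if_true]
      split
      · rfl
      · rw [ih]; congr 1; rw [pv_len_join_snoc, hk]; simp
    · simp only [if_neg hk]
      split
      · rfl
      · rw [ih]; congr 1; rw [pv_len_join_snoc, if_neg hk]

theorem pv_main (entries : List String) (max_length : Int) :
    compress_log_entries entries max_length = compress_log_entries_alt entries max_length := by
  unfold compress_log_entries compress_log_entries_alt
  by_cases h : entries.isEmpty
  · simp only [h, if_true]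
    rw [List.isEmpty_iff.mp h]
    rfl
  · simp only [h, Bool.false_eq_true, if_false]
    rw [pv_loop_eq]
    rfl

-- ===== VERDICT (by name: the statement is the Claim_ definition above) =====
theorem compress_log_entries_spec : Claim_equal_compress_log_entries := by
  intro entries max_length _
  exact pv_main entries max_length
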